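-- pv_equiv track=rewrite | github.com/Jamie793/MyCTFReverseWriteUp | CRACKME/CrackMeLECCIO18Crack_4st.py | calc_license
-- ===== SOURCE A (Python) =====
-- def rol(data, offset):
--     binData = bin(data)[2:]
--     binDataLen = len(binData)
--     if binDataLen != 32:
--         for _ in range(32-binDataLen):
--             binData = '0'+binData
--
--     for _ in range(offset):
--         binData = binData[1:]+binData[0]
--
--     return int(binData, 2) & 0xFFFFFFFF
--
-- def calc_license(userName):
--     ebx = 0
--     eax = 0
--
--     # for i in range(len(userName)):
--     #     eax = ord(userName[i])
--     #     eax ^= i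
--     #     ebx += eax
--
--     ecx = 0
--     while True:
--         eax = ord(userName[ecx])
--         ecx += 1
--         eax ^= ecx
--         ebx += eax
--
--         if ecx >= len(userName):
--             break
--
--     eax = rol(eax,0xC)
--     eax += ebx
--     return eax
-- ===== SOURCE B (Python) =====
-- def calc_license(userName):
--     ebx = 0
--     eax = 0
--     for i, c in enumerate(userName):
--         eax = ord(c) ^ (i + 1)
--         ebx += eax
--     return (((eax << 12) | (eax >> 20)) & 0xFFFFFFFF) + ebx
-- ===== Notes on version B (the rewrite author's own statement) =====
-- stated objective: simpler
-- what changed: Replaces the string-based rotate (pad a binary string to 32 chars, rotate by 12 single-char slicing steps, re-parse) with the arithmetic 32-bit rotate ((eax<<12)|(eax>>20))&0xFFFFFFFF, and replaces the manually indexed while-True loop with a single for-loop over enumerate.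
import Mathlib
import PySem

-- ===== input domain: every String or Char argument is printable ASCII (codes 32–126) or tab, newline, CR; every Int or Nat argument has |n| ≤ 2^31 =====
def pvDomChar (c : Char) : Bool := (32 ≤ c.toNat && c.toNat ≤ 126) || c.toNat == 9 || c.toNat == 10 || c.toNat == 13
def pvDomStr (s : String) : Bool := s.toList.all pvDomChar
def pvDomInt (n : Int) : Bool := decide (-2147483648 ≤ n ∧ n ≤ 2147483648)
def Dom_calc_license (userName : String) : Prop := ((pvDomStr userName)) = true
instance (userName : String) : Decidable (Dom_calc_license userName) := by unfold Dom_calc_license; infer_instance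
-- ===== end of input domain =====

-- B replaces A's string-based rotate (pad a binary string to 32 chars, rotate by 12 one-char
-- slicing steps, re-parse) with the arithmetic 32-bit rotate ((eax<<12)|(eax>>20)) & 0xFFFFFFFF,
-- and A's manually indexed while-True loop with a plain for-loop over enumerate (objective: simpler).

-- ===== PORT A =====
-- int(binData, 2) is hand-ported as parseBin2, exact for the nonempty '0'/'1'-digit-only
-- strings this helper is ever applied to (no sign/space/prefix/underscore handling is reachable).
def parseBin2 (cs : List Char) : Nat :=
  cs.foldl (fun a c => 2 * a + (if c = '1' then 1 else 0)) 0

def rolA (data offset : Int) : Int :=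
  let binData := (PySem.Int.pyBin data).toList.drop 2      -- bin(data)[2:]
  let binDataLen : Int := PySem.List.len binData
  let binData :=
    if binDataLen ≠ 32 then
      (PySem.List.pyRange 0 (32 - binDataLen) 1).foldl (fun b _ => '0' :: b) binData
    else binData
  -- binData[1:] + binData[0]; binData is never empty (bin() yields at least one digit)
  let binData := (PySem.List.pyRange 0 offset 1).foldl (fun b _ => b.drop 1 ++ b.take 1) binData
  PySem.Int.band ((parseBin2 binData : Nat) : Int) 0xFFFFFFFF

-- A's while-True loop; fuel bounds the iterations, `none` = IndexError
def loopA (cs : List Char) (ecx : Nat) (ebx : Int) (fuel : Nat) : Option Int :=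
  match fuel with
  | 0 => none
  | f + 1 =>
    match PySem.List.pyGet? cs (ecx : Int) with
    | none => none
    | some c =>
      let eax := PySem.Int.bxor ((c.toNat : Int)) ((ecx : Int) + 1)
      let ebx' := ebx + eax
      if (ecx : Int) + 1 ≥ PySem.List.len cs then some (rolA eax 12 + ebx')
      else loopA cs (ecx + 1) ebx' f

def calc_license (userName : String) : Int :=
  (loopA userName.toList 0 0 (userName.toList.length + 1)).getD 0

-- ===== PORT B =====
-- shift amounts are the Python literals 12 and 20 (written as Nat, the type Lean shifts take)
def rolArith (d : Int) : Int :=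
  PySem.Int.band (PySem.Int.bor (d <<< (12:Nat)) (d >>> (20:Nat))) 0xFFFFFFFF

-- B's `for i, c in enumerate(userName)` loop
def loopB (cs : List Char) (i : Nat) (eax ebx : Int) : Int × Int :=
  match cs with
  | [] => (eax, ebx)
  | c :: rest =>
    let eax' := PySem.Int.bxor ((c.toNat : Int)) ((i : Int) + 1)
    loopB rest (i + 1) eax' (ebx + eax')

def calc_license_alt (userName : String) : Int :=
  let p := loopB userName.toList 0 0 0
  rolArith p.1 + p.2

-- ===== PRECONDITION & SPEC =====
-- Pre_ excludes the empty string, on which A raises IndexError, and (for theorem completeness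
-- only) strings of length ≥ 2^32, where eax can exceed 32 bits so A's string rotate would act on
-- a wider-than-32-bit word; strings that long are not realizable in practice.
def Pre_calc_license (userName : String) : Prop :=
  userName.toList ≠ [] ∧ userName.toList.length < 4294967296
instance (userName : String) : Decidable (Pre_calc_license userName) := by
  unfold Pre_calc_license; infer_instance

def pvWitness_calc_license : String := "ab"

def Spec_calc_license (userName : String) (out : Int) : Prop := out = calc_license_alt userName
instance (userName : String) (out : Int) : Decidable (Spec_calc_license userName out) := by
  unfold Spec_calc_license; infer_instance

-- ===== CLAIM (what is proved, stated in full; the proofs are below) =====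
def Claim_equal_calc_license : Prop := ∀ (userName : String), Dom_calc_license userName → Pre_calc_license userName → Spec_calc_license userName (calc_license userName)

-- ===== LEMMAS AND PROOFS =====

lemma parseBin2_foldl (cs : List Char) (a : Nat) :
    cs.foldl (fun a c => 2 * a + (if c = '1' then 1 else 0)) a = a * 2 ^ cs.length + parseBin2 cs := by
  induction cs generalizing a with
  | nil => simp [parseBin2]
  | cons c cs ih =>
    simp only [List.foldl_cons, parseBin2, List.length_cons]
    rw [ih (2 * a + _), ih (2 * 0 + _)]
    ring

lemma parseBin2_append (xs ys : List Char) :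
    parseBin2 (xs ++ ys) = parseBin2 xs * 2 ^ ys.length + parseBin2 ys := by
  unfold parseBin2
  rw [List.foldl_append, parseBin2_foldl]
  rfl

lemma parseBin2_lt_aux (cs : List Char) (a : Nat) :
    cs.foldl (fun a c => 2 * a + (if c = '1' then 1 else 0)) a < (a + 1) * 2 ^ cs.length := by
  induction cs generalizing a with
  | nil => simp
  | cons c cs ih =>
    simp only [List.foldl_cons, List.length_cons]
    calc List.foldl _ (2 * a + (if c = '1' then 1 else 0)) cs
        < (2 * a + (if c = '1' then 1 else 0) + 1) * 2 ^ cs.length := ih _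
      _ ≤ (a + 1) * 2 ^ (cs.length + 1) := by
          have : (if c = '1' then 1 else 0) ≤ 1 := by split <;> omega
          have h2 : (0:Nat) < 2 ^ cs.length := Nat.two_pow_pos _
          ring_nf
          nlinarith [h2]

lemma parseBin2_lt (cs : List Char) : parseBin2 cs < 2 ^ cs.length := by
  have := parseBin2_lt_aux cs 0
  simpa [parseBin2] using this

lemma parseBin2_replicate (k : Nat) : parseBin2 (List.replicate k '0') = 0 := by
  induction k with
  | zero => rfl
  | succ k ih => simpa [List.replicate_succ, parseBin2] using ih

lemma foldl_const_fun {α β : Type} (g : α → α) (b : α) (l : List β) :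
    l.foldl (fun x _ => g x) b = g^[l.length] b := by
  induction l generalizing b with
  | nil => rfl
  | cons x l ih => simp [List.foldl_cons, ih, Function.iterate_succ_apply]

lemma iterate_cons_zero (k : Nat) (l : List Char) :
    (fun b => '0' :: b)^[k] l = List.replicate k '0' ++ l := by
  induction k with
  | zero => rfl
  | succ k ih => rw [Function.iterate_succ_apply', ih, List.replicate_succ]; rfl

lemma rot_iterate :
    ∀ (k : Nat) (l : List Char), k ≤ l.length →
      (fun b : List Char => b.drop 1 ++ b.take 1)^[k] l = l.drop k ++ l.take k := by
  intro k
  induction k with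
  | zero => simp
  | succ k ih =>
    intro l hk
    rw [Function.iterate_succ_apply', ih l (by omega)]
    have hlt : k < l.length := by omega
    rw [List.drop_eq_getElem_cons hlt]
    simp only [List.cons_append, List.drop_succ_cons, List.take_succ_cons, List.drop_zero,
      List.take_zero]
    rw [List.take_succ, List.getElem?_eq_getElem hlt]
    simp

def myBits (n : Nat) : List Char :=
  if n < 2 then [Nat.digitChar n]
  else myBits (n / 2) ++ [Nat.digitChar (n % 2)]
decreasing_by exact Nat.div_lt_self (by omega) (by omega)

lemma toDigitsCore_eq_myBits :
    ∀ (f n : Nat) (ds : List Char), 0 < f → n < 2 ^ f → Nat.toDigitsCore 2 f n ds = myBits n ++ ds := by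
  intro f
  induction f with
  | zero => omega
  | succ f ih =>
    intro n ds _ hn
    show (if n / 2 = 0 then (n % 2).digitChar :: ds
          else Nat.toDigitsCore 2 f (n / 2) ((n % 2).digitChar :: ds)) = myBits n ++ ds
    by_cases h2 : n < 2
    · rw [if_pos (by omega), myBits, if_pos h2]
      have : n % 2 = n := Nat.mod_eq_of_lt h2
      rw [this]
      rfl
    · rw [if_neg (by omega), myBits, if_neg h2]
      have hf : 0 < f := by
        rcases Nat.eq_zero_or_pos f with h | h
        · subst h; omega
        · exact h
      rw [ih (n / 2) ((n % 2).digitChar :: ds) hf (by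
        have := Nat.pow_succ 2 f
        omega)]
      simp

lemma toDigits_eq_myBits (n : Nat) : Nat.toDigits 2 n = myBits n := by
  have h1 : n < 2 ^ (n + 1) := lt_of_lt_of_le Nat.lt_two_pow_self (Nat.pow_le_pow_right (by omega) (by omega))
  simpa using toDigitsCore_eq_myBits (n + 1) n [] (by omega) h1

lemma parseBin2_myBits (n : Nat) : parseBin2 (myBits n) = n := by
  induction n using Nat.strong_induction_on with
  | _ n ih =>
    rw [myBits]
    by_cases h2 : n < 2
    · rw [if_pos h2]
      interval_cases n <;> decide
    · rw [if_neg h2]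
      rw [parseBin2_append, ih (n / 2) (Nat.div_lt_self (by omega) (by omega))]
      have : parseBin2 [(n % 2).digitChar] = n % 2 := by
        rcases Nat.mod_two_eq_zero_or_one n with h | h <;> rw [h] <;> decide
      rw [this]
      simp only [List.length_cons, List.length_nil]
      omega

lemma length_myBits_le (n k : Nat) (hk : 0 < k) (h : n < 2 ^ k) : (myBits n).length ≤ k := by
  rw [← toDigits_eq_myBits]
  exact Nat.toDigits_length 2 n k hk h

set_option maxHeartbeats 1000000 in
set_option maxRecDepth 8192 in
lemma rolA_eq_rolArith (n : Nat) (hn : n < 4294967296) : rolA (n : Int) 12 = rolArith (n : Int) := by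
  -- digits of n
  have hbin : ((PySem.Int.pyBin (n : Int)).toList.drop 2) = myBits n := by
    rw [PySem.Int.toList_pyBin]
    simp only [PySem.Int.toBinChars0b]
    rw [if_neg (by exact not_lt.mpr (Int.natCast_nonneg n))]
    simp [toDigits_eq_myBits]
  have hlen : (myBits n).length ≤ 32 := length_myBits_le n 32 (by omega) (by omega)
  -- the padded list
  set L := myBits n with hL
  set P : List Char := List.replicate (32 - L.length) '0' ++ L with hP
  have hPlen : P.length = 32 := by
    simp [hP]
    omega
  have hparseP : parseBin2 P = n := by
    rw [hP, parseBin2_append, parseBin2_replicate, parseBin2_myBits]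
    simp
  -- the padding loop produces P
  have hpad : (if (PySem.List.len L) ≠ 32 then
      (PySem.List.pyRange 0 (32 - PySem.List.len L) 1).foldl (fun b _ => '0' :: b) L
    else L) = P := by
    rw [PySem.List.len_eq]
    by_cases h32 : L.length = 32
    · rw [if_neg (by omega)]
      rw [hP, h32]
      simp
    · rw [if_pos (by omega)]
      have : (32 - (L.length : Int)) = ((32 - L.length : Nat) : Int) := by omega
      rw [this, PySem.List.pyRange_zero_natCast, foldl_const_fun, List.length_map,
        List.length_range, iterate_cons_zero]
  -- the rotation loop
  have h12 : PySem.List.pyRange 0 12 1 = [0,1,2,3,4,5,6,7,8,9,10,11] := by decide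
  have hrot : (PySem.List.pyRange 0 (12:Int) 1).foldl (fun b _ => b.drop 1 ++ b.take 1) P
      = P.drop 12 ++ P.take 12 := by
    rw [h12, foldl_const_fun]
    exact rot_iterate 12 P (by omega)
  -- names for the two parsed halves
  set q := parseBin2 (P.take 12) with hq
  set r := parseBin2 (P.drop 12) with hr
  have hql : (P.take 12).length = 12 := by simp [hPlen]
  have hrl : (P.drop 12).length = 20 := by simp [hPlen]
  have hqlt : q < 4096 := by have := parseBin2_lt (P.take 12); rw [hql] at this; exact this
  have hrlt : r < 1048576 := by have := parseBin2_lt (P.drop 12); rw [hrl] at this; exact this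
  have hsplit : q * 1048576 + r = n := by
    have : P = P.take 12 ++ P.drop 12 := (List.take_append_drop 12 P).symm
    calc q * 1048576 + r = parseBin2 (P.take 12 ++ P.drop 12) := by
          rw [parseBin2_append, hrl, hq, hr]; norm_num
      _ = n := by rw [← this, hparseP]
  have hval : parseBin2 (P.drop 12 ++ P.take 12) = r * 4096 + q := by
    rw [parseBin2_append, hql, hq, hr]
    norm_num
  clear_value q r
  -- the Nat identity behind the two rotates
  have key : ((r * 4096 + q) &&& 4294967295) = ((n <<< 12 ||| n >>> 20) &&& 4294967295) := by
    have e1 : (r * 4096 + q) &&& 4294967295 = (r * 4096 + q) % 2 ^ 32 := by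
      have h := Nat.and_two_pow_sub_one_eq_mod (r * 4096 + q) 32
      norm_num at h
      norm_num
      exact h
    have e2 : (n <<< 12 ||| n >>> 20) &&& 4294967295 = (n <<< 12 ||| n >>> 20) % 2 ^ 32 := by
      have h := Nat.and_two_pow_sub_one_eq_mod (n <<< 12 ||| n >>> 20) 32
      norm_num at h
      norm_num
      exact h
    rw [e1, e2, Nat.or_mod_two_pow]
    have e4 : (n <<< 12) % 2 ^ 32 = r * 4096 := by omega
    have e5 : (n >>> 20) % 2 ^ 32 = q := by omega
    have e0 : (r * 4096 + q) % 2 ^ 32 = r * 4096 + q := by omega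
    rw [e4, e5, e0]
    have e6 := Nat.shiftLeft_add_eq_or_of_lt (i := 12) (b := q) hqlt r
    rw [Nat.shiftLeft_eq] at e6
    norm_num at e6
    exact e6
  -- assemble the two sides
  have hcast : ((4294967295 : Int)) = ((4294967295 : Nat) : Int) := by norm_num
  simp only [rolA, rolArith]
  rw [hbin, hpad, hrot, hval]
  rw [← Int.natCast_shiftLeft, ← Int.natCast_shiftRight, PySem.Int.bor_natCast]
  rw [hcast, PySem.Int.band_natCast, PySem.Int.band_natCast]
  exact congrArg (fun m : Nat => (m : Int)) key

lemma loopB_eax_irrel (cs : List Char) (i : Nat) (e₁ e₂ b : Int) (h : cs ≠ []) :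
    loopB cs i e₁ b = loopB cs i e₂ b := by
  cases cs with
  | nil => exact absurd rfl h
  | cons c rest => simp [loopB]

lemma loopB_fst_spec :
    ∀ (cs : List Char) (i : Nat) (e b : Int), cs ≠ [] →
      ∃ (c : Char) (j : Nat), c ∈ cs ∧ j ≤ i + cs.length ∧
        (loopB cs i e b).1 = ((c.toNat ^^^ j : Nat) : Int) := by
  intro cs
  induction cs with
  | nil => intro _ _ _ h; exact absurd rfl h
  | cons c rest ih =>
    intro i e b _
    by_cases hr : rest = []
    · subst hr
      refine ⟨c, i + 1, List.mem_singleton_self c, by simp, ?_⟩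
      simp only [loopB]
      rw [show ((i : Int) + 1) = ((i + 1 : Nat) : Int) by push_cast; ring,
        PySem.Int.bxor_natCast]
    · obtain ⟨c', j, hmem, hj, hval⟩ :=
        ih (i + 1) (PySem.Int.bxor ((c.toNat : Int)) ((i : Int) + 1))
          (b + PySem.Int.bxor ((c.toNat : Int)) ((i : Int) + 1)) hr
      refine ⟨c', j, List.mem_cons_of_mem c hmem, by simp at hj ⊢; omega, ?_⟩
      rw [← hval]
      rfl

lemma loopA_eq_loopB :
    ∀ (rest pre : List Char) (ebx : Int) (fuel : Nat), rest ≠ [] → rest.length ≤ fuel →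
      loopA (pre ++ rest) pre.length ebx fuel
        = some (rolA (loopB rest pre.length 0 ebx).1 12 + (loopB rest pre.length 0 ebx).2) := by
  intro rest
  induction rest with
  | nil => intro _ _ _ h; exact absurd rfl h
  | cons c rest' ih =>
    intro pre ebx fuel _ hfuel
    obtain ⟨f, rfl⟩ : ∃ f, fuel = f + 1 := ⟨fuel - 1, by simp at hfuel; omega⟩
    have hflen : rest'.length ≤ f := by simp only [List.length_cons] at hfuel; omega
    show (match PySem.List.pyGet? (pre ++ c :: rest') ((pre.length : Nat) : Int) with
      | none => none
      | some ch =>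
        let eax := PySem.Int.bxor ((ch.toNat : Int)) ((pre.length : Int) + 1)
        let ebx' := ebx + eax
        if ((pre.length : Int)) + 1 ≥ PySem.List.len (pre ++ c :: rest') then
          some (rolA eax 12 + ebx')
        else loopA (pre ++ c :: rest') (pre.length + 1) ebx' f) = _
    rw [PySem.List.pyGet?_append_length]
    simp only [PySem.List.len_eq, List.length_append, List.length_cons]
    by_cases hr : rest' = []
    · subst hr
      rw [if_pos (by simp only [List.length_nil]; push_cast; omega)]
      simp only [loopB]
    · rw [if_neg (by
        have : rest'.length ≥ 1 := by
          cases rest' with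
          | nil => exact absurd rfl hr
          | cons _ _ => simp
        push_cast
        omega)]
      have hre : pre ++ c :: rest' = (pre ++ [c]) ++ rest' := by simp
      have hlen1 : pre.length + 1 = (pre ++ [c]).length := by simp
      rw [hre, hlen1, ih (pre ++ [c])
        (ebx + PySem.Int.bxor ((c.toNat : Int)) ((pre.length : Int) + 1)) f hr hflen]
      have heq : loopB (c :: rest') pre.length 0 ebx
          = loopB rest' ((pre ++ [c]).length) 0
              (ebx + PySem.Int.bxor ((c.toNat : Int)) ((pre.length : Int) + 1)) := by
        rw [show loopB (c :: rest') pre.length 0 ebx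
            = loopB rest' (pre.length + 1) (PySem.Int.bxor ((c.toNat : Int)) ((pre.length : Int) + 1))
                (ebx + PySem.Int.bxor ((c.toNat : Int)) ((pre.length : Int) + 1)) from rfl]
        rw [← hlen1]
        exact loopB_eax_irrel _ _ _ _ _ hr
      rw [heq]

theorem main_equiv (s : String) (hne : s.toList ≠ []) (hlen : s.toList.length < 4294967296) :
    calc_license s = calc_license_alt s := by
  unfold calc_license calc_license_alt
  have h := loopA_eq_loopB s.toList [] 0 (s.toList.length + 1) hne (by omega)
  simp only [List.nil_append, List.length_nil] at h
  rw [h]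
  simp only [Option.getD_some]
  obtain ⟨c, j, hmem, hj, hval⟩ := loopB_fst_spec s.toList 0 0 0 hne
  rw [hval]
  have hc : c.toNat < 4294967296 := by
    have h1 := c.val.toNat_lt
    have h2 : c.toNat = c.val.toNat := rfl
    omega
  have hx : c.toNat ^^^ j < 4294967296 := by
    have := @Nat.xor_lt_two_pow c.toNat j 32 (by omega) (by omega)
    omega
  rw [rolA_eq_rolArith _ hx]

-- ===== VERDICT (by name: the statement is the Claim_ definition above) =====
theorem calc_license_spec : Claim_equal_calc_license := by
  intro s _ hp
  unfold Spec_calc_license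
  exact main_equiv s hp.1 hp.2
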